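-- pv_equiv track=rewrite | github.com/arjaygg/analyze-fin | src/analyze_fin/dedup/detector.py | _build_reference_index
-- ===== SOURCE A (Python) =====
-- from collections import defaultdict
-- from collections.abc import Sequence
-- from typing import Any
--
-- def _build_reference_index(
--     transactions: Sequence[dict[str, Any]]
-- ) -> dict[str, list[int]]:
--     """Build index mapping reference numbers to transaction indices."""
--     index: dict[str, list[int]] = defaultdict(list)
--
--     for idx, tx in enumerate(transactions):
--         ref = tx.get("reference_number")
--         if ref:
--             index[str(ref).strip().upper()].append(idx)
--
--     return dict(index)
-- ===== SOURCE B (Python) =====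
-- def _build_reference_index(transactions):
--     """Build index mapping reference numbers to transaction indices."""
--     pairs = [
--         (str(tx["reference_number"]).strip().upper(), idx)
--         for idx, tx in enumerate(transactions)
--         if tx.get("reference_number")
--     ]
--     keys = list(dict.fromkeys(k for k, _ in pairs))
--     return {k: [i for kk, i in pairs if kk == k] for k in keys}
-- ===== Notes on version B (the rewrite author's own statement) =====
-- stated objective: alternative
-- what changed: Replaces the defaultdict hash-bucketing mutation loop by a flat list of (normalized-key, index) pairs, an ordered dedup of the keys, and a per-key filtering pass building the dict in one comprehension.
import Mathlib
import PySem

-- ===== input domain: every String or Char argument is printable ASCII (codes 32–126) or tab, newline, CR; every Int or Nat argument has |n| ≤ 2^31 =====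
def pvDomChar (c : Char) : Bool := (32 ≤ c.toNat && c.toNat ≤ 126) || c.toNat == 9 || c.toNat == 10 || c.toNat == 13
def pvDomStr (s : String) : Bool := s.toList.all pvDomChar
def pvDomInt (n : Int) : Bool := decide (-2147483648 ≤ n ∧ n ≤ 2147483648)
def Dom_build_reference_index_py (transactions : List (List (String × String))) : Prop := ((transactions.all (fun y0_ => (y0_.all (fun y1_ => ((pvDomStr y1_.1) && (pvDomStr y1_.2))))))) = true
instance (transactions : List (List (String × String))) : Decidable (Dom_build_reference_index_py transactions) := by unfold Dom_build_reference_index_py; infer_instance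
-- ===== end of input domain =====

-- B builds the same index via a flat pair list, ordered key-dedup and a per-key filter
-- (objective: alternative decomposition, no dict mutation); proved equal to A on all inputs.

-- ===== PORT A =====
-- A: defaultdict(list); for idx, tx: ref = tx.get("reference_number"); if ref: index[norm(ref)].append(idx); return dict(index)
def build_reference_index_py (transactions : List (List (String × String))) : List (String × List Int) :=
  ((PySem.List.enumerate transactions 0).foldl
    (fun (d : PySem.Dict String (List Int)) p =>
      match (PySem.Dict.mk p.2).get? "reference_number" with
      | none => d
      | some ref =>
        if ref = "" then d
        else d.modify (PySem.Str.upper (PySem.Str.strip ref)) [] (fun v => v ++ [p.1]))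
    PySem.Dict.empty).items

-- ===== PORT B =====
-- B: pairs = [(norm(ref), idx) … if tx.get(...)]; keys = dict.fromkeys-dedup; {k: [i for kk,i in pairs if kk==k]}
def build_reference_index_py_alt (transactions : List (List (String × String))) : List (String × List Int) :=
  let pairs : List (String × Int) :=
    (PySem.List.enumerate transactions 0).filterMap
      (fun p =>
        match (PySem.Dict.mk p.2).get? "reference_number" with
        | none => none
        | some ref =>
          if ref = "" then none
          else some (PySem.Str.upper (PySem.Str.strip ref), p.1))
  let keys := PySem.List.dedup (pairs.map (·.1))
  keys.map (fun k => (k, (pairs.filter (fun q => q.1 == k)).map (·.2)))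

-- ===== PRECONDITION & SPEC =====
def Spec_build_reference_index_py (transactions : List (List (String × String))) (out : List (String × List Int)) : Prop := out = build_reference_index_py_alt transactions
instance (transactions : List (List (String × String))) (out : List (String × List Int)) : Decidable (Spec_build_reference_index_py transactions out) := by unfold Spec_build_reference_index_py; infer_instance

-- ===== CLAIM (what is proved, stated in full; the proofs are below) =====
def Claim_equal_build_reference_index_py : Prop := ∀ (transactions : List (List (String × String))), Dom_build_reference_index_py transactions → Spec_build_reference_index_py transactions (build_reference_index_py transactions)

-- ===== LEMMAS AND PROOFS =====

-- A's filtered loop is the canonical modify-append fold over B's filtered pair list.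
theorem pv_fold_eq_filterMap (l : List (Int × List (String × String)))
    (d : PySem.Dict String (List Int)) :
    l.foldl
      (fun (d : PySem.Dict String (List Int)) p =>
        match (PySem.Dict.mk p.2).get? "reference_number" with
        | none => d
        | some ref =>
          if ref = "" then d
          else d.modify (PySem.Str.upper (PySem.Str.strip ref)) [] (fun v => v ++ [p.1]))
      d
    =
    (l.filterMap
      (fun p =>
        match (PySem.Dict.mk p.2).get? "reference_number" with
        | none => none
        | some ref =>
          if ref = "" then none
          else some (PySem.Str.upper (PySem.Str.strip ref), p.1))).foldl
      (fun (d : PySem.Dict String (List Int)) q => d.modify q.1 [] (fun v => v ++ [q.2]))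
      d := by
  induction l generalizing d with
  | nil => rfl
  | cons p l ih =>
    simp only [List.foldl_cons, List.filterMap_cons]
    cases h : (PySem.Dict.mk p.2).get? "reference_number" with
    | none => simp [ih]
    | some ref =>
      by_cases he : ref = "" <;> simp [he, ih]

theorem pv_modify_fold_items (pairs : List (String × Int)) :
    (pairs.foldl
      (fun (d : PySem.Dict String (List Int)) q => d.modify q.1 [] (fun v => v ++ [q.2]))
      PySem.Dict.empty).items
    =
    (PySem.List.dedup (pairs.map (·.1))).map
      (fun k => (k, (pairs.filter (fun q => q.1 == k)).map (·.2))) := by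
  have hnd : (pairs.foldl
      (fun (d : PySem.Dict String (List Int)) q => d.modify q.1 [] (fun v => v ++ [q.2]))
      PySem.Dict.empty).keys.Nodup := by
    exact PySem.Dict.nodup_keys_foldl_modify_key pairs (·.1) [] (fun _ q => fun v => v ++ [q.2])
      PySem.Dict.empty (by simp [pysem])
  rw [PySem.Dict.items_eq_map_keys _ hnd []]
  have hkeys : (pairs.foldl
      (fun (d : PySem.Dict String (List Int)) q => d.modify q.1 [] (fun v => v ++ [q.2]))
      PySem.Dict.empty).keys = PySem.List.dedup (pairs.map (·.1)) := by
    rw [PySem.Dict.keys_foldl_modify_key]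
    simp [pysem, PySem.Set.update_nil_left]
  rw [hkeys]
  apply List.map_congr_left
  intro k _
  congr 1
  rw [PySem.Dict.getD_foldl_modify_append]
  simp [pysem]

-- ===== VERDICT (by name: the statement is the Claim_ definition above) =====
theorem build_reference_index_py_spec : Claim_equal_build_reference_index_py := by
  intro transactions _
  unfold Spec_build_reference_index_py build_reference_index_py build_reference_index_py_alt
  rw [pv_fold_eq_filterMap, pv_modify_fold_items]
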